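-- pv_equiv track=rewrite | github.com/hufolcher/advent | 2023/13/part1.py | symetry_from_pattern
-- ===== SOURCE A (Python) =====
-- def flatten(pattern):
--     result = []
--     for sub_list in [[elt[0]] * elt[1] for elt in pattern]:
--         result += sub_list
--     return result
--
-- def part1_same(left_pattern: list, right_pattern: list):
--     left = flatten(left_pattern)
--     right = flatten(right_pattern)
--     return all([left_elt == right_elt for left_elt, right_elt in zip(left, right)])
--
-- def symetry_from_pattern(pattern):
--     true_index = 0
--     for i in range(len(pattern)):
--         if pattern[i][1] % 2 == 0:
--             if part1_same(list(reversed(pattern[:i])), pattern[i + 1 :]):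
--                 return True, true_index + pattern[i][1] // 2
--         true_index += pattern[i][1]
--     return False, None
-- ===== SOURCE B (Python) =====
-- def _runs_match(rev_left, right):
--     # Compare flatten(rev_left) with flatten(right) elementwise up to the
--     # shorter length, directly on the runs (no flattening): for each left
--     # run, consume that many equal values from the right run stream.
--     ri = 0
--     rval, rrem = 0, 0
--     for v, need in rev_left:
--         while need > 0:
--             if rrem <= 0:
--                 if ri == len(right):
--                     return True          # right side exhausted: zip truncates
--                 rval, rrem = right[ri]
--                 ri += 1
--             elif v != rval:
--                 return False
--             elif need <= rrem:
--                 rrem -= need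
--                 need = 0
--             else:
--                 need -= rrem
--                 rrem = 0
--     return True
--
-- def symetry_from_pattern(pattern):
--     rev_prefix = []
--     true_index = 0
--     for i, (val, cnt) in enumerate(pattern):
--         if cnt % 2 == 0 and _runs_match(rev_prefix, pattern[i + 1:]):
--             return True, true_index + cnt // 2
--         rev_prefix = [(val, cnt)] + rev_prefix
--         true_index += cnt
--     return False, None
-- ===== Notes on version B (the rewrite author's own statement) =====
-- stated objective: faster
-- what changed: B never flattens the run-length encoding: it matches the reversed prefix against the suffix with a two-pointer walk over the runs, cancelling min(lrem,rrem) elements of equal runs at a time, so the cost depends on the number of runs, not on the total flattened length.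
import Mathlib
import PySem

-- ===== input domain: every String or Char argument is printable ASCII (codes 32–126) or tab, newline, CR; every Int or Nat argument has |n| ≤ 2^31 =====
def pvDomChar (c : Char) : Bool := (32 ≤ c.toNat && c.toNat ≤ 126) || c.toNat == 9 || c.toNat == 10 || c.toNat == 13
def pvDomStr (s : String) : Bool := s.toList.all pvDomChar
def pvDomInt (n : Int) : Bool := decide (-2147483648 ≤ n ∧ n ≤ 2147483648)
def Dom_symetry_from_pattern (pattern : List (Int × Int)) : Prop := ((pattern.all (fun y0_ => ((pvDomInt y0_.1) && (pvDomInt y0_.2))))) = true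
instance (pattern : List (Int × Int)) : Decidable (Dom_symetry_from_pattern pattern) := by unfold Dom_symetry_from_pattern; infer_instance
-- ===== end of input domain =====

-- B replaces A's per-centre flattening of the run-length encoding by a run-by-run
-- consumption of the mirror halves (faster when runs are long); return values are equal.

-- ===== PORT A =====
-- flatten: result = []; for sub_list in [[elt[0]]*elt[1] for elt in pattern]: result += sub_list
def pyFlatten (pattern : List (Int × Int)) : List Int :=
  (pattern.map (fun elt => PySem.List.pyRepeat [elt.1] elt.2)).foldl (fun acc s => acc ++ s) []

-- all([l == r for l, r in zip(left, right)]) on the two flattened lists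
def part1_same (left_pattern right_pattern : List (Int × Int)) : Bool :=
  (((pyFlatten left_pattern).zip (pyFlatten right_pattern)).map (fun p => p.1 == p.2)).all id

-- the for-loop over i: prefx = pattern[:i], rest = pattern[i:], true_index as in A
def symA_go : List (Int × Int) → List (Int × Int) → Int → Bool × Option Int
  | _, [], _ => (false, none)
  | prefx, e :: rest, true_index =>
    if PySem.Int.mod e.2 2 == 0 && part1_same prefx.reverse rest then
      (true, true_index + PySem.Int.floordiv e.2 2)
    else
      symA_go (prefx ++ [e]) rest (true_index + e.2)

def symetry_from_pattern (pattern : List (Int × Int)) : Bool × Option Int :=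
  symA_go [] pattern 0

-- ===== PORT B =====
-- inner while-loop of _runs_match: consume `need` copies of v from the right run
-- stream (rval, rrem, rs); none = value mismatch, some none = right side exhausted,
-- some (some st) = remaining right stream
def eatRun : Int → Int → Int → Int → List (Int × Int) → Option (Option (Int × Int × List (Int × Int)))
  | v, need, rval, rrem, rs =>
    if need ≤ 0 then some (some (rval, rrem, rs))
    else if rrem ≤ 0 then
      match rs with
      | [] => some none
      | (v2, c2) :: t => eatRun v need v2 c2 t
    else if v != rval then none
    else if need ≤ rrem then some (some (rval, rrem - need, rs))
    else
      match rs with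
      | [] => some none
      | (v2, c2) :: t => eatRun v (need - rrem) v2 c2 t

-- the for-loop of _runs_match over the reversed-prefix runs
def runsLoop : List (Int × Int) → Int → Int → List (Int × Int) → Bool
  | [], _, _, _ => true
  | (v, c) :: lt, rval, rrem, rs =>
    match eatRun v c rval rrem rs with
    | none => false
    | some none => true
    | some (some (rv', rr', rs')) => runsLoop lt rv' rr' rs'

def runs_match (rev_left right : List (Int × Int)) : Bool :=
  runsLoop rev_left 0 0 right

def symB_go : List (Int × Int) → List (Int × Int) → Int → Bool × Option Int
  | _, [], _ => (false, none)
  | rev_prefix, (val, cnt) :: rest, true_index =>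
    if PySem.Int.mod cnt 2 == 0 && runs_match rev_prefix rest then
      (true, true_index + PySem.Int.floordiv cnt 2)
    else
      symB_go ((val, cnt) :: rev_prefix) rest (true_index + cnt)

def symetry_from_pattern_alt (pattern : List (Int × Int)) : Bool × Option Int :=
  symB_go [] pattern 0

-- ===== PRECONDITION & SPEC =====
def Spec_symetry_from_pattern (pattern : List (Int × Int)) (out : Bool × Option Int) : Prop := out = symetry_from_pattern_alt pattern
instance (pattern : List (Int × Int)) (out : Bool × Option Int) : Decidable (Spec_symetry_from_pattern pattern out) := by unfold Spec_symetry_from_pattern; infer_instance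

-- ===== CLAIM (what is proved, stated in full; the proofs are below) =====
def Claim_equal_symetry_from_pattern : Prop := ∀ (pattern : List (Int × Int)), Dom_symetry_from_pattern pattern → Spec_symetry_from_pattern pattern (symetry_from_pattern pattern)

-- ===== LEMMAS AND PROOFS =====

-- pointwise-equality of the zipped flattened lists, the value part1_same computes
def zipAllEq (a b : List Int) : Bool := (a.zip b).all (fun p => p.1 == p.2)

lemma zipAllEq_cons (x y : Int) (xs ys : List Int) :
    zipAllEq (x :: xs) (y :: ys) = ((x == y) && zipAllEq xs ys) := by
  simp [zipAllEq]

def flatRuns (l : List (Int × Int)) : List Int :=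
  l.flatMap (fun e => List.replicate e.2.toNat e.1)

lemma pyFlatten_eq_flatRuns (l : List (Int × Int)) : pyFlatten l = flatRuns l := by
  simp [pyFlatten, flatRuns, PySem.List.foldl_append_eq_flatten, List.flatMap,
        PySem.List.pyRepeat_singleton]

lemma part1_same_eq (l r : List (Int × Int)) :
    part1_same l r = zipAllEq (flatRuns l) (flatRuns r) := by
  simp [part1_same, zipAllEq, pyFlatten_eq_flatRuns, List.all_map]

lemma zipAllEq_rep_cancel (v : Int) (n : Nat) :
    ∀ (a b : Nat) (X Y : List Int), n ≤ a → n ≤ b →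
    zipAllEq (List.replicate a v ++ X) (List.replicate b v ++ Y)
      = zipAllEq (List.replicate (a - n) v ++ X) (List.replicate (b - n) v ++ Y) := by
  induction n with
  | zero => intro a b X Y _ _; simp
  | succ k ih =>
    intro a b X Y ha hb
    obtain ⟨a', rfl⟩ : ∃ a', a = a' + 1 := ⟨a - 1, by omega⟩
    obtain ⟨b', rfl⟩ : ∃ b', b = b' + 1 := ⟨b - 1, by omega⟩
    have h1 : a' + 1 - (k + 1) = a' - k := by omega
    have h2 : b' + 1 - (k + 1) = b' - k := by omega
    rw [h1, h2, List.replicate_succ, List.replicate_succ, List.cons_append, List.cons_append,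
      zipAllEq_cons, beq_self_eq_true, Bool.true_and]
    exact ih a' b' X Y (by omega) (by omega)

-- eatRun against the flattened picture: the left run (need copies of v, then L)
-- zipped with the right stream (rrem copies of rval, then the runs rs)
lemma eatRun_eq (v need rval rrem : Int) (rs : List (Int × Int)) (L : List Int) :
    zipAllEq (List.replicate need.toNat v ++ L)
             (List.replicate rrem.toNat rval ++ flatRuns rs)
      = match eatRun v need rval rrem rs with
        | none => false
        | some none => true
        | some (some (rv', rr', rs')) =>
            zipAllEq L (List.replicate rr'.toNat rv' ++ flatRuns rs') := by
  fun_induction eatRun v need rval rrem rs with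
  | case1 v need rval rrem rs h =>
    have : need.toNat = 0 := by omega
    simp [this]
  | case2 v need rval rrem h h2 =>
    have : rrem.toNat = 0 := by omega
    simp [this, flatRuns, zipAllEq, List.zip_nil_right]
  | case3 v need rval rrem h h2 v2 c2 t ih =>
    have : rrem.toNat = 0 := by omega
    rw [← ih]
    simp [this, flatRuns]
  | case4 v need rval rrem rs h h2 hne =>
    obtain ⟨a', ha⟩ : ∃ a', need.toNat = a' + 1 := ⟨need.toNat - 1, by omega⟩
    obtain ⟨b', hb⟩ : ∃ b', rrem.toNat = b' + 1 := ⟨rrem.toNat - 1, by omega⟩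
    rw [ha, hb, List.replicate_succ, List.replicate_succ, List.cons_append, List.cons_append,
      zipAllEq_cons]
    simp only [bne_iff_ne, ne_eq] at hne
    simp [hne]
  | case5 v need rval rrem rs h h2 hne hle =>
    have heq : v = rval := by simpa using hne
    subst heq
    rw [zipAllEq_rep_cancel v need.toNat need.toNat rrem.toNat L _ (le_refl _) (by omega)]
    have h0 : need.toNat - need.toNat = 0 := by omega
    have h3 : rrem.toNat - need.toNat = (rrem - need).toNat := by omega
    rw [h0, h3]
    simp
  | case6 v need rval rrem h h2 hne hgt =>
    have heq : v = rval := by simpa using hne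
    subst heq
    rw [zipAllEq_rep_cancel v rrem.toNat need.toNat rrem.toNat L _ (by omega) (le_refl _)]
    simp [flatRuns, zipAllEq, List.zip_nil_right]
  | case7 v need rval rrem h h2 hne hgt v2 c2 t ih =>
    have heq : v = rval := by simpa using hne
    subst heq
    rw [zipAllEq_rep_cancel v rrem.toNat need.toNat rrem.toNat L _ (by omega) (le_refl _)]
    have h0 : rrem.toNat - rrem.toNat = 0 := by omega
    have h3 : need.toNat - rrem.toNat = (need - rrem).toNat := by omega
    rw [h0, h3, ← ih]
    simp [flatRuns]

lemma runsLoop_eq (ls : List (Int × Int)) :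
    ∀ (rval rrem : Int) (rs : List (Int × Int)),
    runsLoop ls rval rrem rs
      = zipAllEq (flatRuns ls) (List.replicate rrem.toNat rval ++ flatRuns rs) := by
  induction ls with
  | nil => intro rval rrem rs; simp [runsLoop, flatRuns, zipAllEq]
  | cons e lt ih =>
    intro rval rrem rs
    obtain ⟨v, c⟩ := e
    have hflat : flatRuns ((v, c) :: lt) = List.replicate c.toNat v ++ flatRuns lt := by
      simp [flatRuns]
    rw [hflat, eatRun_eq v c rval rrem rs (flatRuns lt)]
    simp only [runsLoop]
    cases h : eatRun v c rval rrem rs with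
    | none => simp
    | some o =>
      cases o with
      | none => simp
      | some st =>
        obtain ⟨rv', rr', rs'⟩ := st
        simp [ih]

lemma runs_match_eq (l r : List (Int × Int)) :
    runs_match l r = zipAllEq (flatRuns l) (flatRuns r) := by
  rw [runs_match, runsLoop_eq]; simp

lemma symA_go_eq_symB_go (rest : List (Int × Int)) :
    ∀ (prefx : List (Int × Int)) (ti : Int),
      symA_go prefx rest ti = symB_go prefx.reverse rest ti := by
  induction rest with
  | nil => intro prefx ti; rfl
  | cons e t ih =>
    intro prefx ti
    obtain ⟨v, c⟩ := e
    simp only [symA_go, symB_go]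
    rw [part1_same_eq, ← runs_match_eq]
    by_cases hc : (PySem.Int.mod c 2 == 0 && runs_match prefx.reverse t) = true
    · rw [if_pos hc, if_pos hc]
    · rw [if_neg hc, if_neg hc, ih (prefx ++ [(v, c)]) (ti + c)]
      simp

-- ===== VERDICT (by name: the statement is the Claim_ definition above) =====
theorem symetry_from_pattern_spec : Claim_equal_symetry_from_pattern := by
  intro pattern _
  show symetry_from_pattern pattern = symetry_from_pattern_alt pattern
  rw [symetry_from_pattern, symetry_from_pattern_alt, symA_go_eq_symB_go]
  rfl
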